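-- pv_equiv track=rewrite | github.com/Floozutter/google-foobar | level2-en-route-salute/solution.py | solution
-- ===== SOURCE A (Python) =====
-- def solution(s):
--     rightwalkers = 0
--     salutes = 0
--     for c in s:
--         if c == ">":
--             rightwalkers += 1
--         elif c == "<":
--             salutes += rightwalkers * 2
--     return salutes
-- ===== SOURCE B (Python) =====
-- def solution(s):
--     total = 0
--     n = len(s)
--     for i in range(n):
--         if s[i] == ">":
--             for j in range(i + 1, n):
--                 if s[j] == "<":
--                     total += 2
--     return total
-- ===== Notes on version B (the rewrite author's own statement) =====
-- stated objective: alternative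
-- what changed: Replaced A's single accumulating pass (running count of '>' seen so far) with an explicit nested brute-force pair count: for each '>' scan the suffix and add 2 per '<'.
import Mathlib
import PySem

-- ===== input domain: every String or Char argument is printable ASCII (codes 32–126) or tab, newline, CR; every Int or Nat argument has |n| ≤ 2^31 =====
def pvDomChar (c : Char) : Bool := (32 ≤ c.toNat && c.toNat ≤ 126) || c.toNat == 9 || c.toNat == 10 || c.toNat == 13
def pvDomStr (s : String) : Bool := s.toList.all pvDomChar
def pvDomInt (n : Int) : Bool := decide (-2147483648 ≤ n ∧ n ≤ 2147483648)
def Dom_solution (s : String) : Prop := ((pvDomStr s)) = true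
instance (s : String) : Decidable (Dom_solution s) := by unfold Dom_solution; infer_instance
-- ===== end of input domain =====

-- B replaces A's single accumulating pass with a brute-force nested pair count (alternative decomposition, same results).

-- ===== PORT A =====
-- state = (rightwalkers, salutes), one pass over the characters
def solution (s : String) : Int :=
  (s.toList.foldl
    (fun (st : Int × Int) c =>
      if c = '>' then (st.1 + 1, st.2)
      else if c = '<' then (st.1, st.2 + st.1 * 2)
      else st)
    (0, 0)).2

-- ===== PORT B =====
-- inner loop of Source B: add 2 for each '<' in the suffix
def solInner : List Char → Int
  | [] => 0
  | c :: rest => (if c = '<' then 2 else 0) + solInner rest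

-- outer loop of Source B: for each '>', run the inner scan over the characters after it
def solGo : List Char → Int
  | [] => 0
  | c :: rest => (if c = '>' then solInner rest else 0) + solGo rest

def solution_alt (s : String) : Int := solGo s.toList

-- ===== PRECONDITION & SPEC =====
def Spec_solution (s : String) (out : Int) : Prop := out = solution_alt s
instance (s : String) (out : Int) : Decidable (Spec_solution s out) := by unfold Spec_solution; infer_instance

-- ===== CLAIM (what is proved, stated in full; the proofs are below) =====
def Claim_equal_solution : Prop := ∀ (s : String), Dom_solution s → Spec_solution s (solution s)

-- ===== LEMMAS AND PROOFS =====
-- loop invariant of A's fold, expressed through B's helpers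
theorem sol_fold_inv (l : List Char) : ∀ (r sal : Int),
    (l.foldl
      (fun (st : Int × Int) c =>
        if c = '>' then (st.1 + 1, st.2)
        else if c = '<' then (st.1, st.2 + st.1 * 2)
        else st)
      (r, sal)).2 = sal + r * solInner l + solGo l := by
  induction l with
  | nil => intro r sal; simp [solInner, solGo]
  | cons c rest ih =>
    intro r sal
    by_cases h1 : c = '>'
    · simp [h1, solInner, solGo, ih]; ring
    · by_cases h2 : c = '<'
      · simp [h1, h2, solInner, solGo, ih]; ring
      · simp [h1, h2, solInner, solGo, ih]

-- ===== VERDICT (by name: the statement is the Claim_ definition above) =====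
theorem solution_spec : Claim_equal_solution := by
  intro s _
  unfold Spec_solution solution solution_alt
  rw [sol_fold_inv]
  ring
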